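-- pv_equiv track=rewrite | github.com/tupkalenkodi/DONE | 2023/movies.py | genres_in_year
-- ===== SOURCE A (Python) =====
-- def genres_in_year(movies):
--     d = {} # {year: [title_1, title_2, ...]}
--     for title in movies:
--         year, rating, genre = movies[title]
--         if year not in d:
--             d[year] = set()
--         for g in genre:
--             d[year].add(g)
--     return d
-- ===== SOURCE B (Python) =====
-- def genres_in_year(movies):
--     # Two-pass decomposition: first collect the distinct years in first-appearance
--     # order, then build each year's genre set by one scan per year.
--     items = list(movies.items())
--     years = []
--     for _title, (year, _rating, _genre) in items:
--         if year not in years: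
--             years.append(year)
--     return {y: {g for _t, (yy, _r, gs) in items if yy == y for g in gs}
--             for y in years}
-- ===== Notes on version B (the rewrite author's own statement) =====
-- stated objective: alternative
-- what changed: Replaces A's single pass that grows a dict of sets in place (check-or-create, then add each genre) with a two-pass build: collect the distinct years first, then construct each year's genre set by a per-year scan in a comprehension.
import Mathlib
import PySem

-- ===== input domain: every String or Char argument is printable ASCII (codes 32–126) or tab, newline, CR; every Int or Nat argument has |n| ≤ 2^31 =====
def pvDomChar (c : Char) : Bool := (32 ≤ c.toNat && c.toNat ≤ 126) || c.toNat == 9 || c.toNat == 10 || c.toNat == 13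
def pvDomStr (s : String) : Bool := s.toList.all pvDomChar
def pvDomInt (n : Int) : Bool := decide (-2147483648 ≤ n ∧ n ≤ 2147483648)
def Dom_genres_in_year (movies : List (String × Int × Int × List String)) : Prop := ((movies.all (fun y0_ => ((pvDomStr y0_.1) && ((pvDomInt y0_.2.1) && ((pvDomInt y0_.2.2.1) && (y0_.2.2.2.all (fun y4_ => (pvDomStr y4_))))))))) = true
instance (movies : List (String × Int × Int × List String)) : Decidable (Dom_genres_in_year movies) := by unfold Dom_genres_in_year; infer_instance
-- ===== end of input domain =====

-- B replaces A's single-pass dict-of-sets accumulation by a two-pass build (collect the distinct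
-- years first, then one scan per year); same return value, no speed claim.


-- ===== PORT A =====
-- A receives a Python dict; the association list is decoded with PySem.Dict.ofList
-- (insertion order, overwrite in place), then A's loop over the dict runs over its items.
def genres_in_year (movies : List (String × Int × Int × List String)) : List (Int × List String) :=
  let m := PySem.Dict.ofList movies
  let d : PySem.Dict Int (PySem.Set String) :=
    m.items.foldl (fun d p =>
      -- year, rating, genre = movies[title]
      let year := p.2.1
      let genre := p.2.2.2
      -- if year not in d: d[year] = set()
      let d := if d.contains year then d else d.insert year PySem.Set.empty
      -- for g in genre: d[year].add(g)
      genre.foldl (fun d g => d.modify year PySem.Set.empty (fun s => PySem.Set.add s g)) d)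
      PySem.Dict.empty
  d.items

-- ===== PORT B =====
def genres_in_year_alt (movies : List (String × Int × Int × List String)) : List (Int × List String) :=
  let items := (PySem.Dict.ofList movies).items
  -- years = []; for _, (y, _, _) in items: if y not in years: years.append(y)
  let years : PySem.Set Int := items.foldl (fun ys p => PySem.Set.add ys p.2.1) PySem.Set.empty
  -- {y: {g for _, (yy, _, gs) in items if yy == y for g in gs} for y in years}
  years.map (fun y =>
    (y, PySem.Set.ofList (((items.filter (fun p => p.2.1 == y)).map (fun p => p.2.2.2)).flatten)))

-- ===== PRECONDITION & SPEC =====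
def Spec_genres_in_year (movies : List (String × Int × Int × List String)) (out : List (Int × List String)) : Prop := out = genres_in_year_alt movies
instance (movies : List (String × Int × Int × List String)) (out : List (Int × List String)) : Decidable (Spec_genres_in_year movies out) := by unfold Spec_genres_in_year; infer_instance

-- ===== CLAIM (what is proved, stated in full; the proofs are below) =====
def Claim_equal_genres_in_year : Prop := ∀ (movies : List (String × Int × Int × List String)), Dom_genres_in_year movies → Spec_genres_in_year movies (genres_in_year movies)

-- ===== LEMMAS AND PROOFS =====

-- The body of A's loop, over the (year, genres) projection of a dict item.
def pvStep (d : PySem.Dict Int (PySem.Set String)) (q : Int × List String) : PySem.Dict Int (PySem.Set String) :=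
  let d := if d.contains q.1 then d else d.insert q.1 PySem.Set.empty
  q.2.foldl (fun d g => d.modify q.1 PySem.Set.empty (fun s => PySem.Set.add s g)) d

-- B's per-year genre set, over (year, genres) pairs.
def pvS (l : List (Int × List String)) (y : Int) : PySem.Set String :=
  PySem.Set.ofList (((l.filter (fun q => q.1 == y)).map (fun q => q.2)).flatten)

-- Re-inserting a key's own stored value is a no-op (keys unique).
lemma pvInsertGetDSelf (d : PySem.Dict Int (PySem.Set String)) (y : Int)
    (hc : d.contains y = true) (hn : d.keys.Nodup) :
    d.insert y (d.getD y PySem.Set.empty) = d := by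
  apply PySem.Dict.ext
  rw [PySem.Dict.items_insert_of_contains d _ hc]
  conv_rhs => rw [← List.map_id d.items]
  apply List.map_congr_left
  rintro ⟨p1, p2⟩ hp
  by_cases h : p1 = y
  · subst h
    have hv := PySem.Dict.getD_of_mem_items d hp hn PySem.Set.empty
    simpa using hv
  · simp [h]

-- A's inner loop 'for g in genre: d[year].add(g)' updates the one entry at y.
lemma pvFoldAdd (gs : List String) (d : PySem.Dict Int (PySem.Set String)) (y : Int)
    (hc : d.contains y = true) (hn : d.keys.Nodup) :
    gs.foldl (fun d g => d.modify y PySem.Set.empty (fun s => PySem.Set.add s g)) d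
      = d.insert y (PySem.Set.update (d.getD y PySem.Set.empty) gs) := by
  induction gs generalizing d with
  | nil =>
      simp only [List.foldl_nil, PySem.Set.update_nil]
      exact (pvInsertGetDSelf d y hc hn).symm
  | cons g gs ih =>
      rw [List.foldl_cons,
          ih (d.modify y PySem.Set.empty (fun s => PySem.Set.add s g))
             (by rw [PySem.Dict.contains_modify]; simp [hc])
             (by rw [PySem.Dict.modify, PySem.Dict.keys_insert_of_contains d _ hc]; exact hn)]
      rw [PySem.Dict.getD_modify_self, PySem.Dict.modify,
          PySem.Dict.insert_insert_self, PySem.Set.update_cons]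

-- One iteration of A's outer loop, as a single insert.
lemma pvStepEq (d : PySem.Dict Int (PySem.Set String)) (y : Int) (gs : List String)
    (hn : d.keys.Nodup) :
    pvStep d (y, gs) = d.insert y (PySem.Set.update (d.getD y PySem.Set.empty) gs) := by
  unfold pvStep
  by_cases hc : d.contains y = true
  · simp only [hc, if_true]
    exact pvFoldAdd gs d y hc hn
  · have hcf : d.contains y = false := by simpa using hc
    simp only [hcf, Bool.false_eq_true, if_false]
    rw [pvFoldAdd gs (d.insert y PySem.Set.empty) y
          (PySem.Dict.contains_insert_self d y _)
          (by rw [PySem.Dict.keys_insert_of_not_contains d _ hcf]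
              apply hn.append (by simp)
              intro a ha hb
              simp only [List.mem_singleton] at hb
              subst hb
              exact absurd ((PySem.Dict.contains_iff_mem_keys d a).mpr ha) (by simp [hcf])),
        PySem.Dict.getD_insert_self, PySem.Dict.insert_insert_self,
        PySem.Dict.getD_of_not_contains _ _ hcf]

lemma pvS_append_self (l : List (Int × List String)) (y : Int) (gs : List String) :
    pvS (l ++ [(y, gs)]) y = PySem.Set.update (pvS l y) gs := by
  simp [pvS, List.filter_append, PySem.Set.ofList_append]

lemma pvS_append_ne (l : List (Int × List String)) (y : Int) (gs : List String)
    (y' : Int) (h : y' ≠ y) :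
    pvS (l ++ [(y, gs)]) y' = pvS l y' := by
  simp [pvS, List.filter_append, Ne.symm h]

-- Invariant of A's loop: the accumulated dict lists the distinct years in first-appearance
-- order, each holding exactly B's per-year genre set.
lemma pvMain (l : List (Int × List String)) :
    (l.foldl pvStep PySem.Dict.empty).items
      = (PySem.Set.ofList (l.map (fun q => q.1))).map (fun y => (y, pvS l y)) := by
  induction l using List.reverseRecOn with
  | nil => simp [PySem.Dict.empty, PySem.Set.ofList_nil]
  | append_singleton l p ih =>
      obtain ⟨y, gs⟩ := p
      have hkeys : (l.foldl pvStep PySem.Dict.empty).keys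
          = PySem.Set.ofList (l.map (fun q => q.1)) := by
        unfold PySem.Dict.keys
        rw [ih, List.map_map]
        exact List.map_id _
      have hnd : (l.foldl pvStep PySem.Dict.empty).keys.Nodup := by
        rw [hkeys]; exact PySem.Set.nodup_ofList _
      rw [List.foldl_append, List.foldl_cons, List.foldl_nil, pvStepEq _ _ _ hnd]
      simp only [List.map_append, List.map_cons, List.map_nil]
      by_cases hy : y ∈ l.map (fun q => q.1)
      · have hc : (l.foldl pvStep PySem.Dict.empty).contains y = true := by
          rw [PySem.Dict.contains_iff_mem_keys, hkeys]
          exact (PySem.Set.mem_ofList _ _).mpr hy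
        have hmem : (y, pvS l y) ∈ (l.foldl pvStep PySem.Dict.empty).items := by
          rw [ih]
          exact List.mem_map_of_mem ((PySem.Set.mem_ofList _ _).mpr hy)
        have hv : (l.foldl pvStep PySem.Dict.empty).getD y PySem.Set.empty = pvS l y :=
          PySem.Dict.getD_of_mem_items _ hmem hnd _
        rw [PySem.Dict.items_insert_of_contains _ _ hc, hv, ih, List.map_map,
            PySem.Set.ofList_append_singleton,
            PySem.Set.add_of_mem ((PySem.Set.mem_ofList _ _).mpr hy)]
        apply List.map_congr_left
        intro y' hy'
        by_cases h : y' = y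
        · subst h
          simp [pvS_append_self]
        · simp [Function.comp, h, pvS_append_ne l y gs y' h]
      · have hcf : (l.foldl pvStep PySem.Dict.empty).contains y = false := by
          rw [Bool.eq_false_iff]
          intro hc
          rw [PySem.Dict.contains_iff_mem_keys, hkeys, PySem.Set.mem_ofList] at hc
          exact hy hc
        have hfil : l.filter (fun q => q.1 == y) = [] := by
          rw [List.filter_eq_nil_iff]
          intro q hq hqy
          simp only [beq_iff_eq] at hqy
          exact hy (hqy ▸ List.mem_map_of_mem hq)
        rw [PySem.Dict.items_insert_of_not_contains _ _ hcf,
            PySem.Dict.getD_of_not_contains _ _ hcf,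
            PySem.Set.ofList_append_singleton,
            PySem.Set.add_of_not_mem (by rw [PySem.Set.mem_ofList]; exact hy),
            List.map_append, ih]
        congr 1
        · apply List.map_congr_left
          intro y' hy'
          have h : y' ≠ y := by
            intro h; subst h
            exact hy ((PySem.Set.mem_ofList _ _).mp hy')
          simp [pvS_append_ne l y gs y' h]
        · simp [pvS, List.filter_append, hfil, PySem.Set.update_nil_left]

theorem genres_in_year_eq_alt (movies : List (String × Int × Int × List String)) :
    genres_in_year movies = genres_in_year_alt movies := by
  unfold genres_in_year genres_in_year_alt
  have hfold : ((PySem.Dict.ofList movies).items.foldl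
        (fun d p => pvStep d (p.2.1, p.2.2.2)) PySem.Dict.empty)
      = (((PySem.Dict.ofList movies).items.map (fun p => ((p.2.1 : Int), p.2.2.2))).foldl
          pvStep PySem.Dict.empty) :=
    List.foldl_map.symm
  show ((PySem.Dict.ofList movies).items.foldl
        (fun d p => pvStep d (p.2.1, p.2.2.2)) PySem.Dict.empty).items = _
  rw [hfold, pvMain]
  have hY : PySem.Set.ofList
        (((PySem.Dict.ofList movies).items.map (fun p => ((p.2.1 : Int), p.2.2.2))).map (fun q => q.1))
      = (PySem.Dict.ofList movies).items.foldl (fun ys p => PySem.Set.add ys p.2.1) PySem.Set.empty := by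
    rw [List.map_map, ← PySem.Set.update_nil_left, PySem.Set.update_map_eq_foldl_add]
    rfl
  have hS : ∀ y : Int, pvS ((PySem.Dict.ofList movies).items.map (fun p => ((p.2.1 : Int), p.2.2.2))) y
      = PySem.Set.ofList ((((PySem.Dict.ofList movies).items.filter
          (fun p => p.2.1 == y)).map (fun p => p.2.2.2)).flatten) := by
    intro y
    unfold pvS
    rw [List.filter_map, List.map_map]
    rfl
  rw [hY]
  simp only [hS]

-- ===== VERDICT (by name: the statement is the Claim_ definition above) =====
theorem genres_in_year_spec : Claim_equal_genres_in_year := by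
  intro movies _
  exact genres_in_year_eq_alt movies
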